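-- pv_equiv track=rewrite | github.com/fars-analemma/transferable-defensive-tokens | exp/aligndeftoken/data/alpacafarm_injection.py | build_benign_samples
-- ===== SOURCE A (Python) =====
-- from copy import deepcopy
-- from typing import Optional
--
-- def recursive_filter(s: str, filters: list[str]) -> str:
--     orig = s
--     for f in filters:
--         s = s.replace(f, "")
--     return recursive_filter(s, filters) if s != orig else s
--
-- def build_benign_samples(
--     data: list[dict],
--     special_tokens: Optional[list[str]] = None,
-- ) -> list[dict]:
--     samples = []
--     for d in data:
--         item = deepcopy(d)
--         if special_tokens:
--             item["input"] = recursive_filter(item["input"], special_tokens)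
--         item["attack"] = "none"
--         samples.append(item)
--     return samples
-- ===== SOURCE B (Python) =====
-- def _strip_tokens(s, filters):
--     # bounded fixpoint loop: each changing pass removes at least one char,
--     # so len(s)+1 passes always suffice
--     for _ in range(len(s) + 1):
--         t = s
--         for f in filters:
--             t = t.replace(f, "")
--         if t == s:
--             return s
--         s = t
--     return s
--
-- def _benign_item(d, special_tokens):
--     item = dict(d)
--     if special_tokens:
--         item["input"] = _strip_tokens(item["input"], special_tokens)
--     item["attack"] = "none"
--     return item
--
-- def build_benign_samples(data, special_tokens=None):
--     return [_benign_item(d, special_tokens) for d in data]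
-- ===== Notes on version B (the rewrite author's own statement) =====
-- stated objective: alternative
-- what changed: The unbounded tail recursion to a replacement fixpoint is replaced by a bounded for-loop (len(s)+1 passes always suffice since each changing pass shortens the string), and the outer accumulator loop becomes a list comprehension over a per-item helper.
import Mathlib
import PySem

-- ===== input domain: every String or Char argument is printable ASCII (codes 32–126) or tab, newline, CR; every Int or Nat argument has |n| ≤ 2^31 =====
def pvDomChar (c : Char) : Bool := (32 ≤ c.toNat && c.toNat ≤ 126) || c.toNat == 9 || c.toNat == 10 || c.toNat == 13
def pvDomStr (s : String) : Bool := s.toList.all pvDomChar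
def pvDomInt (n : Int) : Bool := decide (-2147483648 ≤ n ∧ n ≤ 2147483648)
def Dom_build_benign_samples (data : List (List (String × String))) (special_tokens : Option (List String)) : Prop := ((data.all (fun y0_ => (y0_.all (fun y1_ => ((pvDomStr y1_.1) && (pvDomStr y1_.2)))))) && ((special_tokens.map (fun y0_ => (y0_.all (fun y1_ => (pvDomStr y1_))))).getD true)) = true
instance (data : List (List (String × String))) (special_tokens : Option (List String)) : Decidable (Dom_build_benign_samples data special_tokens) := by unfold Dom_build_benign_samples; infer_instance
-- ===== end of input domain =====

-- B replaces A's unbounded tail recursion to the replacement fixpoint by a bounded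
-- loop (len(s)+1 passes suffice) and the outer accumulator loop by a map; return
-- values agree wherever A returns (objective: alternative decomposition, same cost).

-- ===== PORT A =====

-- termination fact A's recursion needs (cited in its decreasing_by):
-- one pass of replacements either leaves the string unchanged or strictly shortens it
theorem pv_go_cases (old : List Char) (fuel : Nat) (l acc : List Char) (hold : old ≠ []) :
    PySem.Chars.replace.go old [] fuel l acc = acc.reverse ++ l ∨
      (PySem.Chars.replace.go old [] fuel l acc).length < acc.length + l.length := by
  induction fuel generalizing l acc with
  | zero => left; rw [PySem.Chars.replace.go]
  | succ n ih =>
    cases l with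
    | nil =>
      left; rw [PySem.Chars.replace.go]; simp
      omega
    | cons c t =>
      rw [PySem.Chars.replace.go]
      by_cases hp : old.isPrefixOf (c :: t) = true
      · simp only [hp, if_true, List.reverse_nil, List.nil_append]
        right
        have hle : old.length ≤ (c :: t).length :=
          (List.IsPrefix.length_le (List.isPrefixOf_iff_prefix.mp hp))
        have hpos : 0 < old.length := List.length_pos_iff.mpr hold
        have hd : (List.drop old.length (c :: t)).length = (c :: t).length - old.length :=
          List.length_drop
        rcases ih (List.drop old.length (c :: t)) acc with h | h
        · rw [h]; simp only [List.length_append, List.length_reverse]; omega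
        · omega
      · simp only [hp]
        rcases ih t (c :: acc) with h | h
        · left; rw [h]; simp
        · right; simpa [Nat.add_comm, Nat.add_left_comm] using h

theorem pv_replace_empty_cases (s old : String) :
    PySem.Str.replace s old "" = s ∨
      (PySem.Str.replace s old "").toList.length < s.toList.length := by
  have hrepl : PySem.Str.replace s old "" =
      String.ofList (PySem.Chars.replace s.toList old.toList []) := rfl
  by_cases h : old.toList = []
  · left
    have e : PySem.Chars.replace s.toList old.toList [] = s.toList := by
      simp [PySem.Chars.replace, h]
    rw [hrepl, e, String.ofList_toList]
  · have hgo : PySem.Chars.replace s.toList old.toList [] =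
        PySem.Chars.replace.go old.toList [] s.toList.length s.toList [] := by
      simp [PySem.Chars.replace, List.isEmpty_iff, h]
    rcases pv_go_cases old.toList s.toList.length s.toList [] h with hc | hc
    · left; rw [hrepl, hgo, hc]; simp [String.ofList_toList]
    · right; rw [hrepl, hgo]; simpa using hc

theorem pv_pass_cases (filters : List String) (s : String) :
    filters.foldl (fun t f => PySem.Str.replace t f "") s = s ∨
      (filters.foldl (fun t f => PySem.Str.replace t f "") s).toList.length < s.toList.length := by
  induction filters generalizing s with
  | nil => left; rfl
  | cons f fs ih =>
    simp only [List.foldl_cons]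
    rcases pv_replace_empty_cases s f with h | h
    · rw [h]; exact ih s
    · rcases ih (PySem.Str.replace s f "") with h' | h'
      · right; rw [h']; exact h
      · right; exact Nat.lt_trans h' h

-- A's recursive_filter: apply every filter once, recurse while the string changed
def recursive_filter (s : String) (filters : List String) : String :=
  -- s = s.replace(f, "") over all filters, then recurse iff s changed
  if filters.foldl (fun t f => PySem.Str.replace t f "") s ≠ s then
    recursive_filter (filters.foldl (fun t f => PySem.Str.replace t f "") s) filters
  else
    filters.foldl (fun t f => PySem.Str.replace t f "") s
termination_by s.toList.length
decreasing_by
  have ha : List.foldl (fun t (x : {x // x ∈ filters}) => PySem.Str.replace t ↑x "") s filters.attach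
      = List.foldl (fun t f => PySem.Str.replace t f "") s filters :=
    List.foldl_attach (l := filters) (f := fun t f => PySem.Str.replace t f "") (b := s)
  rw [ha]
  rcases pv_pass_cases filters s with hc | hc
  · simp [hc] at *
  · exact hc

def build_benign_samples (data : List (List (String × String))) (special_tokens : Option (List String)) : List (List (String × String)) :=
  data.foldl
    (fun samples d =>
      let item := PySem.Dict.ofList d            -- deepcopy(d) (string values)
      let item :=
        match special_tokens with
        | some (f :: fs) =>
          match item.get? "input" with
          | some v => item.insert "input" (recursive_filter v (f :: fs))
          | none => item                          -- Python raises KeyError here: excluded by Pre_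
        | _ => item
      samples ++ [(item.insert "attack" "none").items])
    []

-- ===== PORT B =====

-- B's bounded loop: for _ in range(len(s)+1): one pass; return once stable
def strip_tokens_loop (filters : List String) : Nat → String → String
  | 0, s => s
  | n + 1, s =>
    let t := filters.foldl (fun t f => PySem.Str.replace t f "") s
    if t = s then s else strip_tokens_loop filters n t

def strip_tokens (s : String) (filters : List String) : String :=
  strip_tokens_loop filters (s.toList.length + 1) s

def benign_item (special_tokens : Option (List String)) (d : List (String × String)) : List (String × String) :=
  let item := PySem.Dict.ofList d                 -- dict(d)
  let item :=
    match special_tokens with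
    | none => item
    | some [] => item
    | some (f :: fs) =>
      match item.get? "input" with
      | none => item                              -- Python raises KeyError here: excluded by Pre_
      | some v => item.insert "input" (strip_tokens v (f :: fs))
  (item.insert "attack" "none").items

def build_benign_samples_alt (data : List (List (String × String))) (special_tokens : Option (List String)) : List (List (String × String)) :=
  data.map (benign_item special_tokens)

-- ===== PRECONDITION & SPEC =====
-- Pre_ excludes only the inputs where both Pythons raise KeyError: special_tokens
-- truthy while some record lacks the "input" key.
def Pre_build_benign_samples (data : List (List (String × String))) (special_tokens : Option (List String)) : Prop :=
  special_tokens.getD [] = [] ∨ ∀ d ∈ data, (PySem.Dict.ofList d).contains "input" = true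
instance (data : List (List (String × String))) (special_tokens : Option (List String)) : Decidable (Pre_build_benign_samples data special_tokens) := by unfold Pre_build_benign_samples; infer_instance

def pvWitness_build_benign_samples : (List (List (String × String))) × Option (List String) :=
  ([[("input", "a<x>b"), ("q", "r")], [("input", "cc")]], some ["<x>", "cc"])

def Spec_build_benign_samples (data : List (List (String × String))) (special_tokens : Option (List String)) (out : List (List (String × String))) : Prop := out = build_benign_samples_alt data special_tokens
instance (data : List (List (String × String))) (special_tokens : Option (List String)) (out : List (List (String × String))) : Decidable (Spec_build_benign_samples data special_tokens out) := by unfold Spec_build_benign_samples; infer_instance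

-- ===== CLAIM (what is proved, stated in full; the proofs are below) =====
def Claim_equal_build_benign_samples : Prop := ∀ (data : List (List (String × String))) (special_tokens : Option (List String)), Dom_build_benign_samples data special_tokens → Pre_build_benign_samples data special_tokens → Spec_build_benign_samples data special_tokens (build_benign_samples data special_tokens)

-- ===== LEMMAS AND PROOFS =====

theorem pv_loop_eq_rec (filters : List String) :
    ∀ (n : Nat) (s : String), s.toList.length < n →
      strip_tokens_loop filters n s = recursive_filter s filters := by
  intro n
  induction n with
  | zero => intro s h; omega
  | succ m ih =>
    intro s h
    rw [recursive_filter.eq_def, strip_tokens_loop]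
    by_cases he : filters.foldl (fun t f => PySem.Str.replace t f "") s = s
    · simp [he]
    · simp only [he, if_false, ne_eq, not_false_iff]
      apply ih
      rcases pv_pass_cases filters s with hc | hc
      · exact absurd hc he
      · omega

theorem pv_strip_eq_rec (s : String) (filters : List String) :
    strip_tokens s filters = recursive_filter s filters :=
  pv_loop_eq_rec filters (s.toList.length + 1) s (Nat.lt_succ_self _)

theorem pv_item_eq (st : Option (List String)) (d : List (String × String)) :
    (let item := PySem.Dict.ofList d
     let item :=
       match st with
       | some (f :: fs) =>
         match item.get? "input" with
         | some v => item.insert "input" (recursive_filter v (f :: fs))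
         | none => item
       | _ => item
     (item.insert "attack" "none").items) = benign_item st d := by
  unfold benign_item
  cases st with
  | none => rfl
  | some l =>
    cases l with
    | nil => rfl
    | cons f fs =>
      simp only
      cases (PySem.Dict.ofList d).get? "input" with
      | none => rfl
      | some v => simp only [pv_strip_eq_rec]

theorem pv_fold_eq (st : Option (List String)) :
    ∀ (data : List (List (String × String))) (acc : List (List (String × String))),
      data.foldl
        (fun samples d =>
          let item := PySem.Dict.ofList d
          let item :=
            match st with
            | some (f :: fs) =>
              match item.get? "input" with
              | some v => item.insert "input" (recursive_filter v (f :: fs))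
              | none => item
            | _ => item
          samples ++ [(item.insert "attack" "none").items])
        acc = acc ++ data.map (benign_item st) := by
  intro data
  induction data with
  | nil => intro acc; simp
  | cons d ds ih =>
    intro acc
    simp only [List.foldl_cons, List.map_cons]
    rw [ih, pv_item_eq]
    simp

-- ===== VERDICT (by name: the statement is the Claim_ definition above) =====
theorem build_benign_samples_spec : Claim_equal_build_benign_samples := by
  intro data st _ _
  unfold Spec_build_benign_samples build_benign_samples build_benign_samples_alt
  simpa using pv_fold_eq st data []
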